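-- pv_equiv track=rewrite | github.com/cchrewrite/ambm | ambm_ver_0.2.0/src/python/RepSimpLib.py | make_is_bset_rule
-- ===== SOURCE A (Python) =====
-- def sub_sets(S, N = -1):
--
--     subsets = [[]]
--
--     if N == -1:
--         MaxN = len(S)
--     else:
--         MaxN = N
--
--     while True:
--         newsets = []
--         for x in subsets:
--             for u in S:
--                 if u in x: continue
--                 y = sorted(x + [u])
--                 if y in subsets: continue
--                 if y in newsets: continue
--                 if len(y) > MaxN: continue
--                 newsets.append(y)
--                 flag = True
--         if newsets == []: break
--         subsets = subsets + newsets
--     subsets = sorted(subsets)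
--     """
--     for i in range(len(S) + 1):
--
--         for j in range(i + 1, len(S) + 1):
--
--             sub = S[i:j]
--             if len(sub) <= MaxN:
--                 subsets.append(sub)
--             else:
--                 break
--     """
--     return subsets
--
-- def make_is_bset_rule(SType,N = -1):
--     res = ["% \"is_bset\" rules."]
--     t = []
--     for S in SType:
--         if S[0] == "bBool": continue
--         if S[0] == "bSet": continue
--         SS = sub_sets(S[1:len(S)],N)
--         for x in SS:
--             if x in t: continue
--             #print x
--
--             #res = res + make_in_relations(x) + [""]
--             t.append(x)
--     for x in t:
--         y = str(x)
--         y = y.replace("\'","")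
--         y = y.replace("\"","")
--         y = "is_bset(" + y + ")."
--         res.append(y)
--     return res
-- ===== SOURCE B (Python) =====
-- def sub_sets(S, N = -1):
--     MaxN = len(S) if N == -1 else N
--
--     def pw(lst):
--         if not lst:
--             return [[]]
--         rest = pw(lst[1:])
--         return rest + [[lst[0]] + r for r in rest]
--
--     elems = sorted(set(S))
--     return sorted([[]] + [s for s in pw(elems) if s and len(s) <= MaxN])
--
-- def make_is_bset_rule(SType, N = -1):
--     seen = set()
--     t = []
--     for S in SType:
--         if S[0] in ("bBool", "bSet"):
--             continue
--         for x in sub_sets(S[1:], N):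
--             k = tuple(x)
--             if k not in seen:
--                 seen.add(k)
--                 t.append(x)
--     return ["% \"is_bset\" rules."] + \
--         ["is_bset(" + str(x).replace("'", "").replace("\"", "") + ")." for x in t]
-- ===== Notes on version B (the rewrite author's own statement) =====
-- stated objective: alternative
-- what changed: sub_sets's fixpoint while-loop (repeatedly extending every known subset by one element with quadratic list-membership dedup) is replaced by a recursive powerset over sorted(set(S)) which yields each bounded subset exactly once with no dedup, and make_is_bset_rule's 'x in t' list scan by a set of tuples; the formatting stays str(x).replace.
import Mathlib
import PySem

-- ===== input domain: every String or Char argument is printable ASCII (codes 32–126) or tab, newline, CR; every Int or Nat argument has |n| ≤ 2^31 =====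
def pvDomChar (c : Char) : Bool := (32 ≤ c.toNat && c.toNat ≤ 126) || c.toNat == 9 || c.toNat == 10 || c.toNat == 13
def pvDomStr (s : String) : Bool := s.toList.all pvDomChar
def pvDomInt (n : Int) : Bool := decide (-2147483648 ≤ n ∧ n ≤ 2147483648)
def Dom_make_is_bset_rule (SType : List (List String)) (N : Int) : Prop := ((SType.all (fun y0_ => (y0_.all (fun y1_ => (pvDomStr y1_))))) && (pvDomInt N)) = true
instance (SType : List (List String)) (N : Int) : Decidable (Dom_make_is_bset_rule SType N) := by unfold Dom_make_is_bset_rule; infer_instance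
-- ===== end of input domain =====

-- B replaces A's fixpoint while-loop over ever-growing subset lists (with quadratic list-membership
-- dedup) by one recursive powerset pass over sorted(set(S)), and the 'x in t' list scan by a set;
-- the output strings are identical. Return value only; neither program mutates its arguments.

-- ---- shared helpers: Python string sorting and str(list-of-str) formatting ----
-- sorted(..) on a list of strings (Python's key=None sort; Lean's String order = code points)
def pvSortS (xs : List String) : List String := PySem.List.sorted xs (fun x => x) false
-- sorted(..) on a list of lists of strings (Python's lexicographic list comparison = Lex (<))
def pvSortL (xs : List (List String)) : List (List String) :=
  @PySem.List.sorted (List String) (List String) List.instLinearOrder.toLT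
    LinearOrder.toDecidableLT xs (fun x => x) false

-- repr(s) body characters; exact for printable ASCII plus tab/newline/CR (the stated domain)
def pvReprBody (quote : Char) (cs : List Char) : List Char :=
  cs.flatMap (fun c =>
    if c = '\\' then ['\\', '\\']
    else if c = Char.ofNat 9 then ['\\', 't']
    else if c = Char.ofNat 10 then ['\\', 'n']
    else if c = Char.ofNat 13 then ['\\', 'r']
    else if c = quote then ['\\', quote]
    else [c])
-- repr(s): single quotes unless s contains ' and no " (CPython's rule); exact on the domain
def pvReprStr (s : String) : List Char :=
  let cs := s.toList
  if cs.contains '\'' && !(cs.contains '"') then '"' :: (pvReprBody '"' cs ++ ['"'])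
  else '\'' :: (pvReprBody '\'' cs ++ ['\''])
-- str(x) for a list of strings: "[" + ", ".join(repr(e)) + "]"
def pvStrOfList (x : List String) : String :=
  String.ofList ('[' :: (PySem.Chars.join [',', ' '] (x.map pvReprStr) ++ [']']))
-- y = str(x); y = y.replace("'",""); y = y.replace("\"",""); "is_bset(" + y + ")."
-- (this exact expression appears verbatim in both Pythons)
def pvFormat (x : List String) : String :=
  "is_bset(" ++ PySem.Str.replace (PySem.Str.replace (pvStrOfList x) "'" "") "\"" "" ++ ")."

-- ===== PORT A =====
-- one pass of the inner 'for x in subsets: for u in S:' body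
def pvStep (subsets : List (List String)) (M : Int) (x : List String)
    (acc : List (List String)) (u : String) : List (List String) :=
  -- y = sorted(x + [u]) written out at each use
  if u ∈ x then acc
  else if pvSortS (x ++ [u]) ∈ subsets then acc
  else if pvSortS (x ++ [u]) ∈ acc then acc
  else if ((pvSortS (x ++ [u])).length : Int) > M then acc
  else acc ++ [pvSortS (x ++ [u])]

-- newsets computed by one iteration of A's 'while True' body
def pvNew (S : List String) (M : Int) (subsets : List (List String)) : List (List String) :=
  subsets.foldl (fun acc x => S.foldl (pvStep subsets M x) acc) []

-- A's 'while True' loop; the fuel len(S)+1 only guards totality (proved sufficient below)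
def subSetsLoop (S : List String) (M : Int) : Nat → List (List String) → List (List String)
  | 0, subsets => subsets
  | fuel + 1, subsets =>
    let newsets := pvNew S M subsets
    if newsets = [] then subsets else subSetsLoop S M fuel (subsets ++ newsets)

def sub_sets (S : List String) (N : Int) : List (List String) :=
  let M := if N = -1 then (S.length : Int) else N
  pvSortL (subSetsLoop S M (S.length + 1) [[]])

def make_is_bset_rule (SType : List (List String)) (N : Int) : List String :=
  let t := SType.foldl (fun (t : List (List String)) S =>
    -- S[0]; Pre_ excludes SType containing an empty list, where Python raises IndexError
    let h := PySem.List.pyGetD S 0 ""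
    if h = "bBool" then t
    else if h = "bSet" then t
    else (sub_sets (PySem.List.slice S (some 1) (some (S.length : Int))) N).foldl
      (fun t x => if x ∈ t then t else t ++ [x]) t) []
  t.foldl (fun res x => res ++ [pvFormat x]) ["% \"is_bset\" rules."]

-- ===== PORT B =====
-- pw(lst): subsets of the tail, each without and with the head
def pvPowerset (lst : List String) : List (List String) :=
  match lst with
  | [] => [[]]
  | h :: tl =>
    let rest := pvPowerset tl
    rest ++ rest.map (fun r => h :: r)

def sub_sets_alt (S : List String) (N : Int) : List (List String) :=
  let M := if N = -1 then (S.length : Int) else N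
  let elems := pvSortS (PySem.Set.ofList S)
  pvSortL ([] :: (pvPowerset elems).filter (fun s => !s.isEmpty && (s.length : Int) ≤ M))

def make_is_bset_rule_alt (SType : List (List String)) (N : Int) : List String :=
  let st := SType.foldl
    (fun (st : PySem.Set (List String) × List (List String)) S =>
      -- S[0]; Pre_ excludes SType containing an empty list, where Python raises IndexError
      let h := PySem.List.pyGetD S 0 ""
      if h = "bBool" || h = "bSet" then st
      else (sub_sets_alt (PySem.List.slice S (some 1) none) N).foldl
        (fun st x => if st.1.contains x then st else (st.1.add x, st.2 ++ [x])) st)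
    (PySem.Set.empty, [])
  "% \"is_bset\" rules." :: st.2.map pvFormat

-- ===== PRECONDITION & SPEC =====
-- Pre_ excludes exactly the inputs where A raises: an empty type list makes S[0] an IndexError.
def Pre_make_is_bset_rule (SType : List (List String)) (N : Int) : Prop :=
  ∀ S ∈ SType, S ≠ []
instance (SType : List (List String)) (N : Int) : Decidable (Pre_make_is_bset_rule SType N) := by
  unfold Pre_make_is_bset_rule; infer_instance

def pvWitness_make_is_bset_rule : List (List String) × Int := ([["bInt", "a", "b"]], -1)

def Spec_make_is_bset_rule (SType : List (List String)) (N : Int) (out : List String) : Prop := out = make_is_bset_rule_alt SType N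
instance (SType : List (List String)) (N : Int) (out : List String) : Decidable (Spec_make_is_bset_rule SType N out) := by unfold Spec_make_is_bset_rule; infer_instance

-- ===== CLAIM (what is proved, stated in full; the proofs are below) =====
def Claim_equal_make_is_bset_rule : Prop := ∀ (SType : List (List String)) (N : Int), Dom_make_is_bset_rule SType N → Pre_make_is_bset_rule SType N → Spec_make_is_bset_rule SType N (make_is_bset_rule SType N)

-- ===== LEMMAS AND PROOFS =====

-- x is a strictly sorted list of elements of S (the canonical form of a subset of set(S))
def pvValid (S x : List String) : Prop := x.Pairwise (· < ·) ∧ ∀ a ∈ x, a ∈ S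
-- the final contents of A's subsets list (and of B's pre-sort list)
def pvQ (S : List String) (M : Int) (x : List String) : Prop :=
  x = [] ∨ (pvValid S x ∧ x ≠ [] ∧ (x.length : Int) ≤ M)
-- contents of A's subsets list after k productive iterations
def pvP (S : List String) (M : Int) (k : Nat) (x : List String) : Prop :=
  x = [] ∨ (pvValid S x ∧ x ≠ [] ∧ x.length ≤ k ∧ (x.length : Int) ≤ M)
def pvComplete (S : List String) (M : Int) (k : Nat) (subsets : List (List String)) : Prop :=
  subsets.Nodup ∧ ∀ x, x ∈ subsets ↔ pvP S M k x
-- what A's inner double loop can append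
def pvGen (S : List String) (M : Int) (subsets : List (List String)) (y : List String) : Prop :=
  ∃ x u, x ∈ subsets ∧ u ∈ S ∧ u ∉ x ∧ y = pvSortS (x ++ [u]) ∧ y ∉ subsets ∧ (y.length : Int) ≤ M
def pvInv (S : List String) (M : Int) (subsets acc : List (List String)) : Prop :=
  acc.Nodup ∧ ∀ y ∈ acc, pvGen S M subsets y


-- ---- small facts about the canonical subset form ----
theorem pvNodupConcat {A : Type} {l : List A} {a : A} (h1 : l.Nodup) (h2 : a ∉ l) :
    (l ++ [a]).Nodup := by
  rw [List.nodup_append]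
  exact ⟨h1, List.nodup_singleton a, fun x hx y hy => by
    simp only [List.mem_singleton] at hy; subst hy; rintro rfl; exact h2 hx⟩

theorem pvValid_nodup {S x : List String} (h : pvValid S x) : x.Nodup := h.1.imp ne_of_lt

theorem pvValid_length_le {S x : List String} (h : pvValid S x) :
    x.length ≤ (PySem.Set.ofList S).length := by
  have hx : x.length = x.toFinset.card := (List.toFinset_card_of_nodup (pvValid_nodup h)).symm
  have hsub : x.toFinset ⊆ S.toFinset := by
    intro a ha; simp only [List.mem_toFinset] at *; exact h.2 a ha
  have h3 : (PySem.Set.ofList S).toFinset = S.toFinset := by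
    ext a; simp [PySem.Set.mem_ofList]
  have h4 : (PySem.Set.ofList S).length = (PySem.Set.ofList S).toFinset.card :=
    (List.toFinset_card_of_nodup (PySem.Set.nodup_ofList S)).symm
  rw [hx, h4, h3]; exact Finset.card_le_card hsub

theorem pvSortS_pairwise_lt {l : List String} (hnd : l.Nodup) : (pvSortS l).Pairwise (· < ·) := by
  have h1 : (pvSortS l).Pairwise (· ≤ ·) := PySem.List.sorted_pairwise l _
  have h2 : (pvSortS l).Pairwise (· ≠ ·) := ((PySem.List.sorted_perm l _ _).nodup_iff).mpr hnd
  exact (h1.and h2).imp (fun h => lt_of_le_of_ne h.1 h.2)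

theorem pvSortS_eq_self {l : List String} (h : l.Pairwise (· < ·)) : pvSortS l = l := by
  unfold pvSortS
  exact PySem.List.sorted_eq_self_of_pairwise _ _ (h.imp (fun hab => le_of_lt hab))

-- the sorted extension of a valid x by a fresh u is valid, one longer
theorem pvExt_valid {S x : List String} {u : String} (hv : pvValid S x) (hu : u ∈ S)
    (hux : u ∉ x) :
    pvValid S (pvSortS (x ++ [u])) ∧ (pvSortS (x ++ [u])).length = x.length + 1 := by
  have hperm : (pvSortS (x ++ [u])).Perm (x ++ [u]) := PySem.List.sorted_perm _ _ _
  have hnd : (x ++ [u]).Nodup := pvNodupConcat (pvValid_nodup hv) hux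
  refine ⟨⟨pvSortS_pairwise_lt hnd, ?_⟩, by simpa using hperm.length_eq⟩
  intro a ha
  have := hperm.mem_iff.mp ha
  rcases List.mem_append.mp this with h | h
  · exact hv.2 a h
  · simp only [List.mem_singleton] at h; subst h; exact hu

-- ---- characterising one iteration's newsets ----
theorem pvStep_subset (subsets : List (List String)) (M : Int) (x : List String)
    (acc : List (List String)) (u : String) : acc ⊆ pvStep subsets M x acc u := by
  unfold pvStep
  split_ifs <;> first | exact fun _ h => h | exact List.subset_append_left _ _

theorem pvFoldS_subset (subsets : List (List String)) (M : Int) (x : List String) :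
    ∀ (L : List String) (acc : List (List String)), acc ⊆ L.foldl (pvStep subsets M x) acc := by
  intro L
  induction L with
  | nil => intro acc; exact fun _ h => h
  | cons a L ih =>
    intro acc
    simp only [List.foldl_cons]
    exact fun z hz => ih _ (pvStep_subset _ _ _ _ _ hz)

theorem pvFoldOuter_subset (S : List String) (M : Int) (subsets : List (List String)) :
    ∀ (L : List (List String)) (acc : List (List String)),
      acc ⊆ L.foldl (fun acc x => S.foldl (pvStep subsets M x) acc) acc := by
  intro L
  induction L with
  | nil => intro acc; exact fun _ h => h
  | cons a L ih =>
    intro acc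
    simp only [List.foldl_cons]
    exact fun z hz => ih _ (pvFoldS_subset _ _ _ _ _ hz)

theorem pvFoldS_complete (subsets : List (List String)) (M : Int) (x : List String)
    (u : String) (hux : u ∉ x)
    (hns : pvSortS (x ++ [u]) ∉ subsets) (hM : ((pvSortS (x ++ [u])).length : Int) ≤ M) :
    ∀ (L : List String) (acc : List (List String)), u ∈ L →
      pvSortS (x ++ [u]) ∈ L.foldl (pvStep subsets M x) acc := by
  intro L
  induction L with
  | nil => intro acc h; exact absurd h List.not_mem_nil
  | cons a L ih =>
    intro acc hm
    simp only [List.foldl_cons]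
    rcases List.mem_cons.mp hm with rfl | hm
    · refine pvFoldS_subset _ _ _ _ _ ?_
      unfold pvStep
      rw [if_neg hux, if_neg hns]
      split_ifs with h1 h2
      · exact h1
      · exact absurd hM (by omega)
      · exact List.mem_append_right _ (List.mem_singleton.mpr rfl)
    · exact ih _ hm

theorem pvFoldOuter_complete (S : List String) (M : Int) (subsets : List (List String))
    (x : List String) (u : String) (hu : u ∈ S) (hux : u ∉ x)
    (hns : pvSortS (x ++ [u]) ∉ subsets) (hM : ((pvSortS (x ++ [u])).length : Int) ≤ M) :
    ∀ (L : List (List String)) (acc : List (List String)), x ∈ L →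
      pvSortS (x ++ [u]) ∈ L.foldl (fun acc x => S.foldl (pvStep subsets M x) acc) acc := by
  intro L
  induction L with
  | nil => intro acc h; exact absurd h List.not_mem_nil
  | cons a L ih =>
    intro acc hm
    simp only [List.foldl_cons]
    rcases List.mem_cons.mp hm with rfl | hm
    · exact pvFoldOuter_subset _ _ _ _ _ (pvFoldS_complete subsets M x u hux hns hM S acc hu)
    · exact ih _ hm

theorem pvStep_inv {S : List String} {M : Int} {subsets : List (List String)}
    {x : List String} {u : String} {acc : List (List String)}
    (hx : x ∈ subsets) (hu : u ∈ S) (h : pvInv S M subsets acc) :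
    pvInv S M subsets (pvStep subsets M x acc u) := by
  unfold pvStep
  split_ifs with h1 h2 h3 h4
  · exact h
  · exact h
  · exact h
  · exact h
  · constructor
    · exact pvNodupConcat h.1 h3
    · intro y hy
      rcases List.mem_append.mp hy with hy | hy
      · exact h.2 y hy
      · simp only [List.mem_singleton] at hy; subst hy
        exact ⟨x, u, hx, hu, h1, rfl, h2, by omega⟩

theorem pvFoldS_inv {S : List String} {M : Int} {subsets : List (List String)}
    {x : List String} (hx : x ∈ subsets) :
    ∀ (L : List String) (acc : List (List String)), (∀ u ∈ L, u ∈ S) →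
      pvInv S M subsets acc → pvInv S M subsets (L.foldl (pvStep subsets M x) acc) := by
  intro L
  induction L with
  | nil => intro acc _ h; exact h
  | cons a L ih =>
    intro acc hL h
    exact ih _ (fun u hu => hL u (List.mem_cons_of_mem a hu))
      (pvStep_inv hx (hL a List.mem_cons_self) h)

theorem pvFoldOuter_inv {S : List String} {M : Int} {subsets : List (List String)} :
    ∀ (L : List (List String)) (acc : List (List String)), (∀ x ∈ L, x ∈ subsets) →
      pvInv S M subsets acc →
      pvInv S M subsets (L.foldl (fun acc x => S.foldl (pvStep subsets M x) acc) acc) := by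
  intro L
  induction L with
  | nil => intro acc _ h; exact h
  | cons a L ih =>
    intro acc hL h
    exact ih _ (fun x hx => hL x (List.mem_cons_of_mem a hx))
      (pvFoldS_inv (hL a List.mem_cons_self) S acc (fun u hu => hu) h)

theorem pvP_valid {S : List String} {M : Int} {k : Nat} {x : List String}
    (h : pvP S M k x) : pvValid S x ∧ x.length ≤ k := by
  rcases h with rfl | ⟨hv, _, hk, _⟩
  · exact ⟨⟨List.Pairwise.nil, by intro a ha; cases ha⟩, by simp⟩
  · exact ⟨hv, hk⟩

theorem pvGen_iff {S : List String} {M : Int} {k : Nat} {subsets : List (List String)}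
    (h : pvComplete S M k subsets) (y : List String) :
    pvGen S M subsets y ↔ (pvValid S y ∧ y.length = k + 1 ∧ (y.length : Int) ≤ M) := by
  constructor
  · rintro ⟨x, u, hx, hu, hux, rfl, hns, hM⟩
    have hP := (h.2 x).mp hx
    obtain ⟨hvx, hlx⟩ := pvP_valid hP
    obtain ⟨hvy, hly⟩ := pvExt_valid hvx hu hux
    refine ⟨hvy, ?_, hM⟩
    -- if x.length + 1 ≤ k the extension would already be in subsets
    by_contra hne
    have hlt : x.length + 1 ≤ k := by omega
    exact hns ((h.2 _).mpr (Or.inr ⟨hvy, by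
      intro hnil
      have := congrArg List.length hnil
      simp [hly] at this, by omega, hM⟩))
  · rintro ⟨hv, hk, hM⟩
    have hynil : y ≠ [] := by intro hnil; subst hnil; simp at hk
    refine ⟨y.dropLast, y.getLast hynil, ?_, ?_, ?_, ?_, ?_, hM⟩
    · -- dropLast is in subsets
      apply (h.2 _).mpr
      by_cases hdn : y.dropLast = []
      · exact Or.inl hdn
      · refine Or.inr ⟨⟨hv.1.sublist (List.dropLast_sublist _), ?_⟩, hdn, ?_, ?_⟩
        · intro a ha; exact hv.2 a (List.dropLast_subset _ ha)
        · have := y.length_dropLast; omega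
        · have := y.length_dropLast; omega
    · exact hv.2 _ (y.getLast_mem hynil)
    · -- getLast not in dropLast, since y is nodup
      intro hmem
      have hnd : y.Nodup := pvValid_nodup hv
      rw [← List.dropLast_concat_getLast hynil, List.nodup_append] at hnd
      exact hnd.2.2 _ hmem _ (List.mem_singleton.mpr rfl) rfl
    · rw [List.dropLast_concat_getLast hynil, pvSortS_eq_self hv.1]
    · -- y is not already in subsets: its length is k+1 > k
      intro hmem
      obtain ⟨-, hl⟩ := pvP_valid ((h.2 _).mp hmem)
      omega

theorem pvNew_char {S : List String} {M : Int} {k : Nat} {subsets : List (List String)}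
    (h : pvComplete S M k subsets) :
    (pvNew S M subsets).Nodup ∧
      ∀ y, y ∈ pvNew S M subsets ↔ (pvValid S y ∧ y.length = k + 1 ∧ (y.length : Int) ≤ M) := by
  have hinv : pvInv S M subsets (pvNew S M subsets) :=
    pvFoldOuter_inv subsets [] (fun x hx => hx) ⟨List.nodup_nil, by intro y hy; cases hy⟩
  refine ⟨hinv.1, fun y => ⟨fun hy => (pvGen_iff h y).mp (hinv.2 y hy), fun hy => ?_⟩⟩
  obtain ⟨x, u, hx, hu, hux, rfl, hns, hM⟩ := (pvGen_iff h y).mpr hy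
  exact pvFoldOuter_complete S M subsets x u hu hux hns hM subsets [] hx

theorem pvComplete_zero (S : List String) (M : Int) : pvComplete S M 0 [[]] := by
  refine ⟨by simp, fun x => ?_⟩
  simp only [List.mem_singleton]
  constructor
  · rintro rfl; exact Or.inl rfl
  · rintro (rfl | ⟨-, hnil, hk, -⟩)
    · rfl
    · exact absurd (List.length_eq_zero_iff.mp (by omega)) hnil

theorem pvQ_of_pvP {S : List String} {M : Int} {k : Nat} {x : List String}
    (h : pvP S M k x) : pvQ S M x := by
  rcases h with rfl | ⟨hv, hnil, -, hM⟩
  · exact Or.inl rfl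
  · exact Or.inr ⟨hv, hnil, hM⟩

theorem pvLoop_good (S : List String) (M : Int) :
    ∀ (fuel k : Nat) (subsets : List (List String)), pvComplete S M k subsets →
      (PySem.Set.ofList S).length + 1 ≤ k + fuel →
      (subSetsLoop S M fuel subsets).Nodup ∧
        ∀ x, x ∈ subSetsLoop S M fuel subsets ↔ pvQ S M x := by
  intro fuel
  induction fuel with
  | zero =>
    intro k subsets h hk
    simp only [subSetsLoop]
    refine ⟨h.1, fun x => ⟨fun hx => pvQ_of_pvP ((h.2 x).mp hx), ?_⟩⟩
    rintro (rfl | ⟨hv, hnil, hM⟩)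
    · exact (h.2 _).mpr (Or.inl rfl)
    · refine (h.2 _).mpr (Or.inr ⟨hv, hnil, ?_, hM⟩)
      have := pvValid_length_le hv; omega
  | succ fuel ih =>
    intro k subsets h hk
    simp only [subSetsLoop]
    obtain ⟨hnd, hmem⟩ := pvNew_char h
    split_ifs with hnil
    · -- no new subsets: everything valid of length ≤ M is already present
      refine ⟨h.1, fun x => ⟨fun hx => pvQ_of_pvP ((h.2 x).mp hx), ?_⟩⟩
      rintro (rfl | ⟨hv, hxnil, hM⟩)
      · exact (h.2 _).mpr (Or.inl rfl)
      · refine (h.2 _).mpr (Or.inr ⟨hv, hxnil, ?_, hM⟩)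
        by_contra hlen
        -- x.take (k+1) would be a new subset, but newsets is empty
        have hkx : k + 1 ≤ x.length := by omega
        have : x.take (k + 1) ∈ pvNew S M subsets := by
          apply (hmem _).mpr
          refine ⟨⟨hv.1.sublist (List.take_sublist ..), ?_⟩, ?_, ?_⟩
          · intro a ha; exact hv.2 a (List.take_subset _ _ ha)
          · simp [List.length_take]; omega
          · simp [List.length_take]
            omega
        rw [hnil] at this; cases this
    · -- recurse with subsets ++ newsets, complete at k+1
      apply ih (k + 1)
      · refine ⟨?_, fun x => ?_⟩
        · rw [List.nodup_append]
          refine ⟨h.1, hnd, fun a ha b hb => ?_⟩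
          rintro rfl
          obtain ⟨-, hla⟩ := pvP_valid ((h.2 a).mp ha)
          obtain ⟨-, hlb, -⟩ := (hmem a).mp hb
          omega
        · rw [List.mem_append, h.2 x, hmem x]
          unfold pvP
          constructor
          · rintro ((rfl | ⟨hv, hnil', hlen, hM⟩) | ⟨hv, hlen, hM⟩)
            · exact Or.inl rfl
            · exact Or.inr ⟨hv, hnil', by omega, hM⟩
            · refine Or.inr ⟨hv, ?_, by omega, hM⟩
              intro hx; subst hx; simp at hlen
          · rintro (rfl | ⟨hv, hnil', hlen, hM⟩)
            · exact Or.inl (Or.inl rfl)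
            · rcases Nat.lt_or_ge x.length (k + 1) with hlt | hge
              · exact Or.inl (Or.inr ⟨hv, hnil', by omega, hM⟩)
              · exact Or.inr ⟨hv, by omega, hM⟩
      · omega

-- ---- B side: powerset of a strictly sorted list ----
theorem pvPowerset_char : ∀ {lst : List String}, lst.Pairwise (· < ·) →
    (pvPowerset lst).Nodup ∧
      ∀ y, y ∈ pvPowerset lst ↔ (y.Pairwise (· < ·) ∧ ∀ a ∈ y, a ∈ lst) := by
  intro lst
  induction lst with
  | nil =>
    intro _
    refine ⟨by simp [pvPowerset], fun y => ?_⟩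
    simp only [pvPowerset, List.mem_singleton]
    constructor
    · rintro rfl; exact ⟨List.Pairwise.nil, by intro a ha; cases ha⟩
    · rintro ⟨-, h⟩
      cases y with
      | nil => rfl
      | cons a y => exact absurd (h a List.mem_cons_self) (List.not_mem_nil)
  | cons h tl ih =>
    intro hp
    have hhd : ∀ b ∈ tl, h < b := fun b hb => (List.pairwise_cons.mp hp).1 b hb
    have hnotin : h ∉ tl := fun hmem => lt_irrefl h (hhd h hmem)
    obtain ⟨ihnd, ihmem⟩ := ih (List.pairwise_cons.mp hp).2
    constructor
    · simp only [pvPowerset]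
      rw [List.nodup_append]
      refine ⟨ihnd, ihnd.map (fun a b hab => by simpa using hab), fun y hy z hz => ?_⟩
      rintro rfl
      obtain ⟨r, hr, rfl⟩ := List.mem_map.mp hz
      have := ((ihmem _).mp hy).2 h List.mem_cons_self
      exact hnotin this
    · intro y
      simp only [pvPowerset, List.mem_append, List.mem_map]
      constructor
      · rintro (hy | ⟨r, hr, rfl⟩)
        · obtain ⟨h1, h2⟩ := (ihmem y).mp hy
          exact ⟨h1, fun a ha => List.mem_cons_of_mem h (h2 a ha)⟩
        · obtain ⟨h1, h2⟩ := (ihmem r).mp hr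
          refine ⟨List.pairwise_cons.mpr ⟨fun b hb => hhd b (h2 b hb), h1⟩,
            fun a ha => ?_⟩
          rcases List.mem_cons.mp ha with rfl | ha
          · exact List.mem_cons_self
          · exact List.mem_cons_of_mem h (h2 a ha)
      · rintro ⟨hpy, hsub⟩
        by_cases hh : h ∈ y
        · cases y with
          | nil => cases hh
          | cons a r =>
            have hra : a = h := by
              rcases List.mem_cons.mp hh with rfl | hh'
              · rfl
              · have h1 : a < h := (List.pairwise_cons.mp hpy).1 h hh'
                have h2 : h < a := by
                  rcases List.mem_cons.mp (hsub a List.mem_cons_self) with rfl | ha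
                  · exact absurd h1 (lt_irrefl a)
                  · exact hhd a ha
                exact absurd (h1.trans h2) (lt_irrefl a)
            subst hra
            refine Or.inr ⟨r, (ihmem r).mpr ⟨(List.pairwise_cons.mp hpy).2, fun b hb => ?_⟩, rfl⟩
            have hab : a < b := (List.pairwise_cons.mp hpy).1 b hb
            rcases List.mem_cons.mp (hsub b (List.mem_cons_of_mem a hb)) with rfl | hbtl
            · exact absurd hab (lt_irrefl b)
            · exact hbtl
        · refine Or.inl ((ihmem y).mpr ⟨hpy, fun a ha => ?_⟩)
          rcases List.mem_cons.mp (hsub a ha) with rfl | ha'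
          · exact absurd ha hh
          · exact ha'

theorem pvMem_sortS_ofList (S : List String) (a : String) :
    a ∈ pvSortS (PySem.Set.ofList S) ↔ a ∈ S := by
  unfold pvSortS
  rw [PySem.List.mem_sorted]
  exact (PySem.Set.mem_ofList (y := a) (xs := S))

-- ---- the two sub_sets agree ----
theorem pv_sub_sets_eq (S : List String) (N : Int) : sub_sets S N = sub_sets_alt S N := by
  unfold sub_sets sub_sets_alt
  set M := if N = -1 then (S.length : Int) else N with hM
  have hsorted : (pvSortS (PySem.Set.ofList S)).Pairwise (· < ·) :=
    PySem.List.sorted_ofList_pairwise_lt S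
  obtain ⟨hBnd, hBmem⟩ := pvPowerset_char hsorted
  obtain ⟨hAnd, hAmem⟩ := pvLoop_good S M (S.length + 1) 0 [[]] (pvComplete_zero S M)
    (by have : (PySem.Set.ofList S).length ≤ S.length := PySem.Set.length_ofList_le S
        omega)
  apply PySem.List.sorted_eq_sorted_of_perm _ _ _ (fun a b h => h)
  apply (List.perm_ext_iff_of_nodup hAnd ?_).mpr
  · intro x
    rw [hAmem x]
    simp only [List.mem_cons, List.mem_filter]
    constructor
    · rintro (rfl | ⟨hv, hnil, hMle⟩)
      · exact Or.inl rfl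
      · refine Or.inr ⟨(hBmem x).mpr ⟨hv.1, fun a ha => ?_⟩, ?_⟩
        · exact (pvMem_sortS_ofList S a).mpr (hv.2 a ha)
        · simp [hnil, hMle]
    · rintro (rfl | ⟨hx, hcond⟩)
      · exact Or.inl rfl
      · obtain ⟨h1, h2⟩ := (hBmem x).mp hx
        simp only [Bool.and_eq_true, Bool.not_eq_eq_eq_not, Bool.not_true, decide_eq_true_eq,
          List.isEmpty_eq_false_iff] at hcond
        refine Or.inr ⟨⟨h1, fun a ha => ?_⟩, hcond.1, hcond.2⟩
        exact (pvMem_sortS_ofList S a).mp (h2 a ha)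
  · -- B's pre-sort list is nodup: [] is not kept by the filter, and the powerset is nodup
    refine List.nodup_cons.mpr ⟨fun hmem => ?_, hBnd.filter _⟩
    have := (List.mem_filter.mp hmem).2
    simp at this

-- ---- outer loop: the accumulated t lists coincide ----
theorem pvSlice_eq (S : List String) :
    PySem.List.slice S (some 1) (some (S.length : Int)) = PySem.List.slice S (some 1) none := by
  simp [pysem]

theorem pvInnerFold_eq :
    ∀ (xs : List (List String)) (t : List (List String)),
      xs.foldl (fun (st : PySem.Set (List String) × List (List String)) x =>
          if st.1.contains x then st else (st.1.add x, st.2 ++ [x])) (t, t) =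
        (xs.foldl (fun t x => if x ∈ t then t else t ++ [x]) t,
         xs.foldl (fun t x => if x ∈ t then t else t ++ [x]) t) := by
  intro xs
  induction xs with
  | nil => intro t; rfl
  | cons a xs ih =>
    intro t
    simp only [List.foldl_cons]
    have hc : PySem.Set.contains t a = decide (a ∈ t) := by simp [PySem.Set.contains]
    by_cases hmem : a ∈ t
    · rw [show (if PySem.Set.contains (α := List String) t a then (t, t)
            else (PySem.Set.add t a, t ++ [a])) = (t, t) by rw [hc]; simp [hmem],
          if_pos hmem]
      exact ih t
    · rw [show (if PySem.Set.contains (α := List String) t a then (t, t)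
            else (PySem.Set.add t a, t ++ [a])) = (t ++ [a], t ++ [a]) by
            rw [hc]; simp [hmem, PySem.Set.add, PySem.Set.contains],
          if_neg hmem]
      exact ih (t ++ [a])

theorem pvOuterFold_eq (N : Int) :
    ∀ (L : List (List String)) (t : List (List String)),
      L.foldl (fun (st : PySem.Set (List String) × List (List String)) S =>
          let h := PySem.List.pyGetD S 0 ""
          if h = "bBool" || h = "bSet" then st
          else (sub_sets_alt (PySem.List.slice S (some 1) none) N).foldl
            (fun st x => if st.1.contains x then st else (st.1.add x, st.2 ++ [x])) st) (t, t) =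
        (L.foldl (fun (t : List (List String)) S =>
          let h := PySem.List.pyGetD S 0 ""
          if h = "bBool" then t
          else if h = "bSet" then t
          else (sub_sets (PySem.List.slice S (some 1) (some (S.length : Int))) N).foldl
            (fun t x => if x ∈ t then t else t ++ [x]) t) t,
         L.foldl (fun (t : List (List String)) S =>
          let h := PySem.List.pyGetD S 0 ""
          if h = "bBool" then t
          else if h = "bSet" then t
          else (sub_sets (PySem.List.slice S (some 1) (some (S.length : Int))) N).foldl
            (fun t x => if x ∈ t then t else t ++ [x]) t) t) := by
  intro L
  induction L with
  | nil => intro t; rfl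
  | cons S L ih =>
    intro t
    simp only [List.foldl_cons]
    by_cases hb : PySem.List.pyGetD S 0 "" = "bBool"
    · simp only [hb]; simpa using ih t
    · by_cases hs : PySem.List.pyGetD S 0 "" = "bSet"
      · simp only [hs]; simpa using ih t
      · simp only [if_neg hb, if_neg hs]
        rw [show (decide (PySem.List.pyGetD S 0 "" = "bBool") ||
              decide (PySem.List.pyGetD S 0 "" = "bSet")) = false by simp [hb, hs]]
        simp only [Bool.false_eq_true, if_false]
        rw [← pvSlice_eq S, ← pv_sub_sets_eq, pvInnerFold_eq]
        exact ih _

-- ===== VERDICT (by name: the statement is the Claim_ definition above) =====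
theorem make_is_bset_rule_spec : Claim_equal_make_is_bset_rule := by
  intro SType N _ _
  unfold Spec_make_is_bset_rule make_is_bset_rule make_is_bset_rule_alt
  have h := pvOuterFold_eq N SType []
  simp only [show (PySem.Set.empty (α := List String), ([] : List (List String))) =
    (([] : List (List String)), ([] : List (List String))) from rfl] at *
  rw [h]
  rw [PySem.List.foldl_append_singleton_eq_map]
  rfl
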